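-- pv_equiv track=rewrite | github.com/shreyaskeerthi/CS-115 | HW2.py | PLCS
-- ===== SOURCE A (Python) =====
-- def LCS (a , b ):
--     if not (a and b):
--         return ""
--     if ( a[0]==b[0]):
--         return a[0] + LCS(a[1:], b[1:])
--     useIt = LCS(a,b[1:])
--     loseIt = LCS(a[1:],b)
--
--     if max(len(loseIt),len(useIt))==len(useIt):
--         return useIt
--     return loseIt
--
-- def PLCS(a, b):
--     if isinstance(a,str) and isinstance(b,str):
--         return [PLCS(a,[LCS(a,b),0]),PLCS(b,[LCS(a,b),0])]
--     if isinstance(b,list):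
--
--         lcs = b[0]
--         if lcs != "":
--             index = a.find(lcs[0])
--             oindex = index + b[1]
--
--             return [oindex] + PLCS(a[index:],[lcs[1:],oindex])
--         else:
--             return []
-- ===== SOURCE B (Python) =====
-- def positions(s, lcs):
--     out = []
--     p = 0
--     for c in lcs:
--         p = s.find(c, p)
--         out.append(p)
--     return out
--
-- def PLCS(a, b):
--     n, m = len(a), len(b)
--     # rows[i][j] = length of the LCS of a[i:] and b[j:], built bottom-up
--     rows = [[0] * (m + 1)]
--     for i in range(n - 1, -1, -1):
--         below = rows[0]
--         row = [0]
--         for j in range(m - 1, -1, -1):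
--             if a[i] == b[j]:
--                 row.insert(0, 1 + below[j + 1])
--             else:
--                 row.insert(0, max(row[0], below[j]))
--         rows.insert(0, row)
--     # walk the table, preferring to advance in b on ties (A's tie-break)
--     i = j = 0
--     out = []
--     while i < n and j < m:
--         if a[i] == b[j]:
--             out.append(a[i]); i += 1; j += 1
--         elif rows[i][j + 1] >= rows[i + 1][j]:
--             j += 1
--         else:
--             i += 1
--     lcs = ''.join(out)
--     return [positions(a, lcs), positions(b, lcs)]
-- ===== Notes on version B (the rewrite author's own statement) =====
-- stated objective: faster
-- what changed: Replaces the exponential double recursion (LCS recomputed at every branch, and recomputed twice at top level) with a bottom-up O(n*m) length table plus a single forward walk reproducing the same prefer-advance-in-b tie-break, and replaces the recursive slice-based position search with one iterative find-from pass over each full string.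
import Mathlib
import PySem

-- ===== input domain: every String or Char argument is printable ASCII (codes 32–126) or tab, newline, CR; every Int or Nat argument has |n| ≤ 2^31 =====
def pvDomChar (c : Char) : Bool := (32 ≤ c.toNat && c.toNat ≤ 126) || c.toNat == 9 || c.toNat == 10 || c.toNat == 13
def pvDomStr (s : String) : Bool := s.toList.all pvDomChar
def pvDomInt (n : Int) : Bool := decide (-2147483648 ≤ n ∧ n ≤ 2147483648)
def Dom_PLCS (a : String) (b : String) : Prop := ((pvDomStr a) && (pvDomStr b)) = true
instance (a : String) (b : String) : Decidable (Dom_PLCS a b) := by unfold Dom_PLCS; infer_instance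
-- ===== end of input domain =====

-- B replaces A's exponential double recursion by an O(n*m) DP table with the same
-- tie-break and an iterative position pass; same return value, asymptotically faster.

-- ===== PORT A =====
-- LCS(a, b) on the code-point lists of the strings
def LCSa : (a : List Char) → (b : List Char) → List Char
  | [], _ => []
  | _ :: _, [] => []
  | x :: a', y :: b' =>
    if x = y then x :: LCSa a' b'
    else
      let useIt := LCSa (x :: a') b'
      let loseIt := LCSa a' (y :: b')
      if max loseIt.length useIt.length = useIt.length then useIt else loseIt
termination_by a b => a.length + b.length
decreasing_by all_goals simp <;> omega

-- the list-argument branch of Python's PLCS: PLCS(a, [lcs, off])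
def posA (a : List Char) (lcs : List Char) (off : Int) : List Int :=
  match lcs with
  | [] => []
  | c :: rest =>
    let index := PySem.Chars.find a [c]
    let oindex := index + off
    oindex :: posA (PySem.List.slice a (some index) none) rest oindex

def PLCS (a : String) (b : String) : List (List Int) :=
  [posA a.toList (LCSa a.toList b.toList) 0, posA b.toList (LCSa a.toList b.toList) 0]

-- ===== PORT B =====
-- inner loop of Source B: build row i (indexed by j) from row i+1 ('below'), right to left
def buildRow (x : Char) : (bs : List Char) → (below : List Nat) → List Nat
  | [], _ => [0]
  | y :: ys, below =>
    let rest := buildRow x ys below.tail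
    (if x = y then 1 + below.tail.headD 0 else max (rest.headD 0) (below.headD 0)) :: rest

-- outer loop of Source B: rows n .. 0, bottom-up
def buildTable (la lb : List Char) : List (List Nat) :=
  la.foldr (fun x rows => buildRow x lb (rows.headD []) :: rows)
    [List.replicate (lb.length + 1) 0]

-- the while loop of Source B: walk the table from (0,0), preferring to advance j on ties
def walk (t : List (List Nat)) : (a : List Char) → (b : List Char) → Nat → Nat → List Char
  | [], _, _, _ => []
  | _ :: _, [], _, _ => []
  | x :: a', y :: b', i, j =>
    if x = y then x :: walk t a' b' (i + 1) (j + 1)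
    else if (t.getD (i + 1) []).getD j 0 ≤ (t.getD i []).getD (j + 1) 0 then
      walk t (x :: a') b' i (j + 1)
    else
      walk t a' (y :: b') (i + 1) j
termination_by a b => a.length + b.length
decreasing_by all_goals simp <;> omega

-- positions(s, lcs) of Source B: one forward pass, s.find(c, p)
def posB (s : List Char) : (lcs : List Char) → (p : Int) → List Int
  | [], _ => []
  | c :: rest, p =>
    let p' := PySem.Chars.findFrom s [c] p none
    p' :: posB s rest p'

def PLCS_alt (a : String) (b : String) : List (List Int) :=
  let la := a.toList
  let lb := b.toList
  let lcs := walk (buildTable la lb) la lb 0 0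
  [posB la lcs 0, posB lb lcs 0]

-- ===== PRECONDITION & SPEC =====
def Spec_PLCS (a : String) (b : String) (out : List (List Int)) : Prop := out = PLCS_alt a b
instance (a : String) (b : String) (out : List (List Int)) : Decidable (Spec_PLCS a b out) := by unfold Spec_PLCS; infer_instance

-- ===== CLAIM (what is proved, stated in full; the proofs are below) =====
def Claim_equal_PLCS : Prop := ∀ (a : String) (b : String), Dom_PLCS a b → Spec_PLCS a b (PLCS a b)

-- ===== LEMMAS AND PROOFS =====

theorem LCSa_nil_right (a : List Char) : LCSa a [] = [] := by
  cases a <;> simp [LCSa]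

-- length recurrence in the mismatch branch
theorem LCSa_length_cons_ne (x y : Char) (a' b' : List Char) (h : x ≠ y) :
    (LCSa (x :: a') (y :: b')).length
      = max (LCSa (x :: a') b').length (LCSa a' (y :: b')).length := by
  rw [LCSa]
  simp only [if_neg h]
  split <;> omega

-- buildRow computes the new row of suffix-LCS lengths
theorem tails_eq_cons (l : List Char) : ∃ ts, l.tails = l :: ts := by
  cases l <;> simp

theorem drop_sublist_drop (l : List Char) {k m : Nat} (h : k ≤ m) :
    List.Sublist (l.drop m) (l.drop k) := by
  have he : l.drop m = (l.drop k).drop (m - k) := by rw [List.drop_drop]; congr 1; omega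
  rw [he]; exact List.drop_sublist _ _

theorem buildRow_eq (x : Char) (a' : List Char) : ∀ (bs : List Char),
    buildRow x bs (bs.tails.map fun b' => (LCSa a' b').length)
      = bs.tails.map fun b' => (LCSa (x :: a') b').length := by
  intro bs
  induction bs with
  | nil => simp [buildRow, LCSa_nil_right]
  | cons y ys ih =>
    obtain ⟨ts, hts⟩ := tails_eq_cons ys
    rw [List.tails_cons, buildRow]
    simp only [List.map_cons, List.tail_cons]
    rw [ih]
    simp only [hts, List.map_cons, List.headD_cons]
    congr 1
    by_cases hxy : x = y
    · subst hxy
      have hL : LCSa (x :: a') (x :: ys) = x :: LCSa a' ys := by rw [LCSa]; simp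
      rw [if_pos rfl, hL]
      all_goals simp [Nat.add_comm]
    · rw [if_neg hxy, LCSa_length_cons_ne x y a' ys hxy]

theorem buildTable_eq (la lb : List Char) :
    buildTable la lb = la.tails.map fun a' => lb.tails.map fun b' => (LCSa a' b').length := by
  induction la with
  | nil =>
    simp only [buildTable, List.foldr_nil]
    have htn : ([] : List Char).tails = [[]] := rfl
    rw [htn, List.map_cons, List.map_nil]
    congr 1
    symm
    rw [List.eq_replicate_iff]
    refine ⟨by simp [List.length_tails], ?_⟩
    intro v hv
    simp only [List.mem_map] at hv
    obtain ⟨b', _, rfl⟩ := hv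
    simp [LCSa]
  | cons x la' ih =>
    have hstep : buildTable (x :: la') lb
        = buildRow x lb ((buildTable la' lb).headD []) :: buildTable la' lb := rfl
    obtain ⟨ts, hts⟩ := tails_eq_cons la'
    rw [hstep, ih, List.tails_cons]
    simp only [hts, List.map_cons, List.headD_cons]
    congr 1
    exact buildRow_eq x la' lb

-- table lookup = suffix-LCS length
theorem table_getD (la lb : List Char) (i j : Nat) (hi : i ≤ la.length) (hj : j ≤ lb.length) :
    ((buildTable la lb).getD i []).getD j 0 = (LCSa (la.drop i) (lb.drop j)).length := by
  rw [buildTable_eq]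
  have hi' : i < (la.tails.map fun a' => lb.tails.map fun b' => (LCSa a' b').length).length := by
    simp [List.length_tails]; omega
  rw [List.getD_eq_getElem _ _ hi']
  simp only [List.getElem_map, List.getElem_tails]
  have hj' : j < (lb.tails.map fun b' => (LCSa (la.drop i) b').length).length := by
    simp [List.length_tails]; omega
  rw [List.getD_eq_getElem _ _ hj']
  simp only [List.getElem_map, List.getElem_tails]

-- the walk reproduces A's LCS
theorem walk_eq (la lb : List Char) : ∀ (n : Nat) (a' b' : List Char) (i j : Nat),
    a'.length + b'.length ≤ n → la.drop i = a' → lb.drop j = b' →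
    walk (buildTable la lb) a' b' i j = LCSa a' b' := by
  intro n
  induction n with
  | zero =>
    intro a' b' i j hn ha hb
    cases a' with
    | nil => simp [walk, LCSa]
    | cons x a'' => simp at hn
  | succ n ih =>
    intro a' b' i j hn ha hb
    cases a' with
    | nil => simp [walk, LCSa]
    | cons x a'' =>
      cases b' with
      | nil => simp [walk, LCSa_nil_right]
      | cons y b'' =>
        have hi : i < la.length := by
          by_contra h
          rw [List.drop_eq_nil_of_le (by omega)] at ha
          exact absurd ha (by simp)
        have hj : j < lb.length := by
          by_contra h
          rw [List.drop_eq_nil_of_le (by omega)] at hb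
          exact absurd hb (by simp)
        have ha' : la.drop (i + 1) = a'' := by
          rw [← List.tail_drop, ha, List.tail_cons]
        have hb' : lb.drop (j + 1) = b'' := by
          rw [← List.tail_drop, hb, List.tail_cons]
        rw [walk]
        by_cases hxy : x = y
        · subst hxy
          rw [if_pos rfl, ih a'' b'' (i+1) (j+1) (by simp at hn ⊢; omega) ha' hb']
          rw [LCSa, if_pos rfl]
        · rw [if_neg hxy]
          have hu : ((buildTable la lb).getD i []).getD (j+1) 0 = (LCSa (x :: a'') b'').length := by
            rw [table_getD la lb i (j+1) (by omega) (by omega), ha, hb']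
          have hl : ((buildTable la lb).getD (i+1) []).getD j 0 = (LCSa a'' (y :: b'')).length := by
            rw [table_getD la lb (i+1) j (by omega) (by omega), ha', hb]
          rw [hu, hl]
          rw [LCSa]
          simp only [if_neg hxy]
          by_cases hc : (LCSa a'' (y :: b'')).length ≤ (LCSa (x :: a'') b'').length
          · rw [if_pos hc, ih (x :: a'') b'' i (j+1) (by simp at hn ⊢; omega) ha hb']
            have hmax : max (LCSa a'' (y :: b'')).length (LCSa (x :: a'') b'').length
                = (LCSa (x :: a'') b'').length := Nat.max_eq_right hc
            simp [hmax]
          · rw [if_neg hc, ih a'' (y :: b'') (i+1) j (by simp at hn ⊢; omega) ha' hb]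
            have hne : max (LCSa a'' (y :: b'')).length (LCSa (x :: a'') b'').length
                ≠ (LCSa (x :: a'') b'').length := by omega
            rw [if_neg hne]

-- the LCS A computes is a common subsequence
theorem LCSa_sublist_n : ∀ (n : Nat) (a b : List Char), a.length + b.length ≤ n →
    List.Sublist (LCSa a b) a ∧ List.Sublist (LCSa a b) b := by
  intro n
  induction n with
  | zero =>
    intro a b hn
    cases a with
    | nil => simp [LCSa]
    | cons x a' => simp at hn
  | succ n ih =>
    intro a b hn
    cases a with
    | nil => simp [LCSa]
    | cons x a' =>
      cases b with
      | nil => simp [LCSa_nil_right]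
      | cons y b' =>
        rw [LCSa]
        by_cases hxy : x = y
        · subst hxy
          rw [if_pos rfl]
          have h := ih a' b' (by simp at hn ⊢; omega)
          exact ⟨h.1.cons₂ x, h.2.cons₂ x⟩
        · rw [if_neg hxy]
          have hU := ih (x :: a') b' (by simp at hn ⊢; omega)
          have hL := ih a' (y :: b') (by simp at hn ⊢; omega)
          by_cases hc : max (LCSa a' (y :: b')).length (LCSa (x :: a') b').length
              = (LCSa (x :: a') b').length
          · simp only [if_pos hc]
            exact ⟨hU.1, hU.2.cons y⟩
          · simp only [if_neg hc]
            exact ⟨hL.1.cons x, hL.2⟩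

theorem LCSa_sublist (a b : List Char) :
    List.Sublist (LCSa a b) a ∧ List.Sublist (LCSa a b) b :=
  LCSa_sublist_n (a.length + b.length) a b le_rfl

-- first occurrence of c in l, as PySem.Chars.find sees it
theorem find_singleton_pos (c : Char) (l : List Char) (h : c ∈ l) :
    0 ≤ PySem.Chars.find l [c] := by
  rw [PySem.Chars.find_nonneg_iff]
  obtain ⟨pre, suf, rfl⟩ := List.append_of_mem h
  exact ⟨pre, suf, by simp⟩

theorem sublist_drop_find_succ (c : Char) (rest l : List Char)
    (h : List.Sublist (c :: rest) l) :
    List.Sublist rest (l.drop ((PySem.Chars.find l [c]).toNat + 1)) := by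
  obtain ⟨r1, r2, rfl, hcr1, hsub⟩ := List.cons_sublist_iff.mp h
  obtain ⟨p1, p2, rfl⟩ := List.append_of_mem hcr1
  have hform : (p1 ++ c :: p2) ++ r2 = p1 ++ c :: (p2 ++ r2) := by simp
  rw [hform]
  have hmem : c ∈ p1 ++ c :: (p2 ++ r2) := by simp
  have hpos := find_singleton_pos c _ hmem
  have hspec := PySem.Chars.find_spec (s := p1 ++ c :: (p2 ++ r2)) (sub := [c]) hpos
  have hdropq : (p1 ++ c :: (p2 ++ r2)).drop p1.length = c :: (p2 ++ r2) :=
    List.drop_left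
  have hq : List.IsPrefix [c] ((p1 ++ c :: (p2 ++ r2)).drop p1.length) := by
    rw [hdropq]; simp
  have hkq : (PySem.Chars.find (p1 ++ c :: (p2 ++ r2)) [c]).toNat ≤ p1.length := by
    by_contra hlt
    exact hspec.2 p1.length (by omega) hq
  have hdropq1 : (p1 ++ c :: (p2 ++ r2)).drop (p1.length + 1) = p2 ++ r2 := by
    rw [List.drop_append]
    simp
  have h1 : List.Sublist rest ((p1 ++ c :: (p2 ++ r2)).drop (p1.length + 1)) := by
    rw [hdropq1]
    exact hsub.trans (List.sublist_append_right _ _)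
  exact h1.trans (drop_sublist_drop _ (by omega))

-- B's single forward position pass equals A's slice-and-offset recursion
theorem pos_eq (s : List Char) : ∀ (lcs : List Char) (p : Nat),
    p ≤ s.length → List.Sublist lcs (s.drop p) →
    posB s lcs (p : Int) = posA (s.drop p) lcs (p : Int) := by
  intro lcs
  induction lcs with
  | nil => intro p _ _; simp [posA, posB]
  | cons c rest ih =>
    intro p hp hsub
    have hmem : c ∈ s.drop p := by
      obtain ⟨r1, r2, heq, hc, _⟩ := List.cons_sublist_iff.mp hsub
      rw [heq]
      exact List.mem_append.mpr (Or.inl hc)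
    have hfind := find_singleton_pos c (s.drop p) hmem
    set f := PySem.Chars.find (s.drop p) [c] with hf
    have hfl : f ≤ (s.drop p).length := PySem.Chars.find_le_length _ _
    have hlen : (s.drop p).length = s.length - p := by simp
    rw [posB, posA]
    have hff : PySem.Chars.findFrom s [c] (p : Int) none
        = if PySem.Chars.find (s.drop p) [c] = -1 then -1
          else (p : Int) + PySem.Chars.find (s.drop p) [c] :=
      PySem.Chars.findFrom_natCast s [c] p hp
    have hne : ¬ (f = -1) := by omega
    rw [hff, ← hf, if_neg hne]
    have hslice : PySem.List.slice (s.drop p) (some f) none = s.drop (p + f.toNat) := by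
      have h0 : f = ((f.toNat : Nat) : Int) := by omega
      rw [h0, PySem.List.slice_from_natCast, List.drop_drop]
      all_goals simp
      all_goals omega
    have hoff : (p : Int) + f = ((p + f.toNat : Nat) : Int) := by push_cast; omega
    have hoff2 : f + (p : Int) = ((p + f.toNat : Nat) : Int) := by push_cast; omega
    rw [hslice, hoff, hoff2]
    have hrest : List.Sublist rest (s.drop (p + f.toNat)) := by
      have h1 := sublist_drop_find_succ c rest (s.drop p) hsub
      rw [← hf, List.drop_drop] at h1
      exact h1.trans (drop_sublist_drop s (by omega))
    have hih := ih (p + f.toNat) (by omega) hrest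
    rw [hih]

-- ===== VERDICT (by name: the statement is the Claim_ definition above) =====
theorem PLCS_spec : Claim_equal_PLCS := by
  intro a b _
  unfold Spec_PLCS PLCS PLCS_alt
  have hw : walk (buildTable a.toList b.toList) a.toList b.toList 0 0
      = LCSa a.toList b.toList :=
    walk_eq a.toList b.toList (a.toList.length + b.toList.length) _ _ 0 0 le_rfl rfl rfl
  have hsub := LCSa_sublist a.toList b.toList
  have h1 := pos_eq a.toList (LCSa a.toList b.toList) 0 (by omega) (by simpa using hsub.1)
  have h2 := pos_eq b.toList (LCSa a.toList b.toList) 0 (by omega) (by simpa using hsub.2)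
  simp only [hw, Nat.cast_zero, List.drop_zero] at h1 h2 ⊢
  rw [h1, h2]
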